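-- pv_equiv track=rewrite | github.com/TEAMLAB-Lecture/morsecode-HuicheolMoon | morsecode.py | is_validated_morse_code
-- ===== SOURCE A (Python) =====
-- def get_morse_code_dict():
--     # return a dictionary of morse code
--     morse_code = {
--         "A": ".-", "N": "-.", "B": "-...", "O": "---", "C": "-.-.", "P": ".--.", "D": "-..", "Q": "--.-", "E": ".",
--         "R": ".-.", "F": "..-.", "S": "...", "G": "--.", "T": "-", "H": "....", "U": "..-", "I": "..", "V": "...-",
--         "K": "-.-", "X": "-..-", "J": ".---", "W": ".--", "L": ".-..", "Y": "-.--", "M": "--", "Z": "--.."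
--     }
--     return morse_code
--
-- def is_validated_morse_code(user_input: str) -> bool:
--     """
--     Input:
--         - user_input : 문자열값으로 사용자가 입력하는 문자
--     Output:
--         - 입력한 값이 아래에 해당될 경우 False, 그렇지 않으면 True
--           1) "-","."," "외 다른 글자가 포함되어 있는 경우
--           2) get_morse_code_dict 함수에 정의된 Morse Code 부호외 다른 코드가 입력된 경우 ex)......
--     Examples:
--         >>> import morsecode as mc
--         >>> mc.is_validated_morse_code("..")
--         True
--         >>> mc.is_validated_morse_code("..-")
--         True
--         >>> mc.is_validated_morse_code("..-..")
--         False
--         >>> mc.is_validated_morse_code(". . . .")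
--         True
--         >>> mc.is_validated_morse_code("-- -- -- --")
--         True
--         >>> mc.is_validated_morse_code("!.1 abc --")
--         False
--     """
--     # ===Modify codes below=============
--     # 조건에 따라 변환되어야 할 결과를 result 변수에 할당 또는 필요에 따라 자유로운 수정
--     morse_code_dict = get_morse_code_dict()
--     morse_code_dict_code = list(morse_code_dict.values())  # morse_code_dict 의 code list
--     morse_code_components = ["-", ".", " "]
--     result = True
--
--     for char in user_input:
--         if char not in morse_code_components:
--             # "-", ".", " "외 다른 글자가 포함된 경우
--             result = False
--             return result
--
--     for word in user_input.split():
--         if word not in morse_code_dict_code: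
--             # morse_code list 에 code 가 없는 경우
--             result = False
--             return result
--
--     return result
-- ===== SOURCE B (Python) =====
-- def get_morse_code_dict():
--     morse_code = {
--         "A": ".-", "N": "-.", "B": "-...", "O": "---", "C": "-.-.", "P": ".--.", "D": "-..", "Q": "--.-", "E": ".",
--         "R": ".-.", "F": "..-.", "S": "...", "G": "--.", "T": "-", "H": "....", "U": "..-", "I": "..", "V": "...-",
--         "K": "-.-", "X": "-..-", "J": ".---", "W": ".--", "L": ".-..", "Y": "-.--", "M": "--", "Z": "--.."
--     }
--     return morse_code
--
--
-- def is_validated_morse_code(user_input: str) -> bool: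
--     # single streaming pass: tokenize on spaces while validating characters and tokens
--     codes = set(get_morse_code_dict().values())
--     token = ""
--     for ch in user_input:
--         if ch == '-' or ch == '.':
--             token += ch
--         elif ch == ' ':
--             if token:
--                 if token not in codes:
--                     return False
--                 token = ""
--         else:
--             return False
--     return (not token) or (token in codes)
-- ===== Notes on version B (the rewrite author's own statement) =====
-- stated objective: alternative
-- what changed: Replaces A's two passes (a character-validation scan followed by split() plus a per-word scan of the 26-code list) with one streaming pass that builds space-separated tokens and checks each against a set of the codes.
import Mathlib
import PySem

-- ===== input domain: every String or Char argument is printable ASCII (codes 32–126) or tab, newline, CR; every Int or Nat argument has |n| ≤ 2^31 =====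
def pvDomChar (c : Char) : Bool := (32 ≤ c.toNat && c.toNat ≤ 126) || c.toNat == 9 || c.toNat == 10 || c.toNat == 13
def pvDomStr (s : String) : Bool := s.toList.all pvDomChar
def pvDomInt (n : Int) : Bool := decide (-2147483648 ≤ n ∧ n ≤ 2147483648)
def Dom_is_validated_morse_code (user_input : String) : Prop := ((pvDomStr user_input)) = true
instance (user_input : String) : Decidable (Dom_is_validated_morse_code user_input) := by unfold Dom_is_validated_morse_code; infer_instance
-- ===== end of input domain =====

-- B replaces A's two passes (char scan, then split() + linear scan of the code list per word)
-- by one streaming tokenizer pass checking tokens against a set of the codes.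


-- ===== PORT A =====
def get_morse_code_dict : List (String × String) :=
  [("A", ".-"), ("N", "-."), ("B", "-..."), ("O", "---"), ("C", "-.-."), ("P", ".--."),
   ("D", "-.."), ("Q", "--.-"), ("E", "."), ("R", ".-."), ("F", "..-."), ("S", "..."),
   ("G", "--."), ("T", "-"), ("H", "...."), ("U", "..-"), ("I", ".."), ("V", "...-"),
   ("K", "-.-"), ("X", "-..-"), ("J", ".---"), ("W", ".--"), ("L", ".-.."), ("Y", "-.--"),
   ("M", "--"), ("Z", "--..")]

-- first loop of A: return False on the first char outside ["-", ".", " "]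
def pvA_charLoop : List Char → Bool
  | [] => true
  | c :: rest => if c ∈ ['-', '.', ' '] then pvA_charLoop rest else false

-- second loop of A: return False on the first word not in the code list
def pvA_wordLoop (codes : List String) : List String → Bool
  | [] => true
  | w :: rest => if codes.contains w then pvA_wordLoop codes rest else false

def is_validated_morse_code (user_input : String) : Bool :=
  let morse_code_dict := get_morse_code_dict
  let morse_code_dict_code := morse_code_dict.map Prod.snd
  if pvA_charLoop user_input.toList then
    pvA_wordLoop morse_code_dict_code (PySem.Str.split₀ user_input)
  else false

-- ===== PORT B =====
def pvB_codeSet : PySem.Set String :=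
  PySem.Set.ofList (get_morse_code_dict.map Prod.snd)

-- B's single streaming pass: grow the current token, check it at each space / at the end
def pvB_loop (codes : PySem.Set String) : List Char → List Char → Bool
  | tok, [] => tok.isEmpty || codes.contains (String.ofList tok)
  | tok, c :: rest =>
    if c = '-' ∨ c = '.' then pvB_loop codes (tok ++ [c]) rest
    else if c = ' ' then
      if tok.isEmpty then pvB_loop codes tok rest
      else if codes.contains (String.ofList tok) then pvB_loop codes [] rest
      else false
    else false

def is_validated_morse_code_alt (user_input : String) : Bool :=
  pvB_loop pvB_codeSet [] user_input.toList

-- ===== PRECONDITION & SPEC =====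
def Spec_is_validated_morse_code (user_input : String) (out : Bool) : Prop := out = is_validated_morse_code_alt user_input
instance (user_input : String) (out : Bool) : Decidable (Spec_is_validated_morse_code user_input out) := by unfold Spec_is_validated_morse_code; infer_instance

-- ===== CLAIM (what is proved, stated in full; the proofs are below) =====
def Claim_equal_is_validated_morse_code : Prop := ∀ (user_input : String), Dom_is_validated_morse_code user_input → Spec_is_validated_morse_code user_input (is_validated_morse_code user_input)

-- ===== LEMMAS AND PROOFS =====

-- unfolding equations for PySem.Chars.split₀.go
theorem pv_go_nil (cur : List Char) (acc : List (List Char)) :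
    PySem.Chars.split₀.go [] cur acc =
      (if cur.isEmpty then acc.reverse else (cur.reverse :: acc).reverse) := rfl

theorem pv_go_cons (c : Char) (rest cur : List Char) (acc : List (List Char)) :
    PySem.Chars.split₀.go (c :: rest) cur acc =
      (if PySem.Chars.isspace c then
        (if cur.isEmpty then PySem.Chars.split₀.go rest [] acc
         else PySem.Chars.split₀.go rest [] (cur.reverse :: acc))
       else PySem.Chars.split₀.go rest (c :: cur) acc) := rfl

-- split₀.go's accumulator peels off as a prefix
theorem pv_go_acc (cs : List Char) (cur : List Char) (acc : List (List Char)) :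
    PySem.Chars.split₀.go cs cur acc = acc.reverse ++ PySem.Chars.split₀.go cs cur [] := by
  induction cs generalizing cur acc with
  | nil =>
    rw [pv_go_nil, pv_go_nil]
    by_cases h : cur.isEmpty <;> simp [h]
  | cons c rest ih =>
    rw [pv_go_cons, pv_go_cons]
    by_cases hs : PySem.Chars.isspace c
    · by_cases he : cur.isEmpty
      · simp only [hs, he, if_true]
        exact ih [] acc
      · simp only [hs, he, if_true, if_false, Bool.false_eq_true]
        rw [ih [] (cur.reverse :: acc), ih [] [cur.reverse]]
        simp
    · simp only [hs, if_false, Bool.false_eq_true]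
      exact ih _ _

-- the key invariant: B's streaming loop = (all chars legal) && (all remaining tokens in the set)
theorem pv_main (cs : List Char) (tok : List Char) :
    pvB_loop pvB_codeSet tok cs =
      (pvA_charLoop cs &&
        (PySem.Chars.split₀.go cs tok.reverse []).all
          (fun t => pvB_codeSet.contains (String.ofList t))) := by
  induction cs generalizing tok with
  | nil =>
    rw [pv_go_nil]
    cases tok with
    | nil => simp [pvB_loop, pvA_charLoop]
    | cons a as =>
      simp [pvB_loop, pvA_charLoop]
  | cons c rest ih =>
    by_cases hd : c = '-' ∨ c = '.'
    · have hs : PySem.Chars.isspace c = false := by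
        rcases hd with h | h <;> subst h <;> decide
      have hm : c ∈ ['-', '.', ' '] := by
        rcases hd with h | h <;> subst h <;> simp
      simp only [pvB_loop, hd, if_true, pvA_charLoop, hm]
      rw [ih, pv_go_cons]
      have hrev : (tok ++ [c]).reverse = c :: tok.reverse := by simp
      simp only [hrev, hs, if_false, Bool.false_eq_true]
    · by_cases hsp : c = ' '
      · subst hsp
        have hs : PySem.Chars.isspace ' ' = true := by decide
        have hm : (' ' : Char) ∈ ['-', '.', ' '] := by simp
        cases tok with
        | nil =>
          simp only [pvB_loop, hd, if_false, if_true, List.isEmpty]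
          rw [ih, pv_go_cons]
          simp only [pvA_charLoop, hm, if_true, hs, List.reverse_nil, List.isEmpty_nil]
        | cons a as =>
          have hne : ((a :: as).reverse).isEmpty = false := by
            simp [List.isEmpty_eq_false_iff]
          simp only [pvB_loop, hd, if_false, if_true, List.isEmpty, Bool.false_eq_true]
          rw [pv_go_cons]
          simp only [pvA_charLoop, hm, if_true, hs, hne, if_false, Bool.false_eq_true]
          rw [pv_go_acc rest [] [(a :: as).reverse.reverse], List.reverse_reverse,
            List.reverse_singleton]
          cases hc : pvB_codeSet.contains (String.ofList (a :: as)) with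
          | true =>
            simp only [if_true]
            rw [ih]
            simp only [List.reverse_nil, List.all_append, List.all_cons, List.all_nil, hc,
              Bool.and_true, Bool.true_and]
          | false =>
            simp only [Bool.false_eq_true, if_false, List.all_append, List.all_cons,
              List.all_nil, hc, Bool.and_true, Bool.false_and, Bool.and_false]
      · have hm : c ∉ ['-', '.', ' '] := by
          intro h
          rcases List.mem_cons.mp h with h1 | h2
          · exact hd (Or.inl h1)
          rcases List.mem_cons.mp h2 with h1 | h3
          · exact hd (Or.inr h1)
          rcases List.mem_cons.mp h3 with h1 | h4
          · exact hsp h1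
          · simp at h4
        simp [pvB_loop, hd, hsp, pvA_charLoop, hm]

theorem pv_wordLoop_all (codes : List String) (ws : List String) :
    pvA_wordLoop codes ws = ws.all (fun w => codes.contains w) := by
  induction ws with
  | nil => rfl
  | cons w rest ih =>
    by_cases h : w ∈ codes <;> simp [pvA_wordLoop, h, ih]

theorem pv_codeSet_eq : pvB_codeSet = get_morse_code_dict.map Prod.snd := by decide

-- ===== VERDICT (by name: the statement is the Claim_ definition above) =====
theorem is_validated_morse_code_spec : Claim_equal_is_validated_morse_code := by
  intro s _
  unfold Spec_is_validated_morse_code is_validated_morse_code is_validated_morse_code_alt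
  rw [pv_main s.toList []]
  cases h : pvA_charLoop s.toList with
  | false => simp
  | true =>
    simp only [if_true, Bool.true_and]
    rw [pv_wordLoop_all]
    have hgo : PySem.Chars.split₀.go s.toList [].reverse [] = PySem.Chars.split₀ s.toList := rfl
    rw [hgo, ← PySem.Str.split₀_map_toList s, List.all_map]
    congr 1
    funext w
    simp [Function.comp, pv_codeSet_eq]
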